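-- pv_equiv track=rewrite | github.com/CarterCahill25/Class-Work | Class Projects/Computer Science 1 HW/hw5a.py | searchWordNetwork
-- ===== SOURCE A (Python) =====
-- def searchWordNetwork(source, target, D):
--
--     # Initialization: processed and reached are two dictionaries that will help in the
--     # exploration.
--     # reached: contains all words that have been reached but not processed.
--     # processed: contains all words that have been reached and processed, i.e., their neighbors have also been explored.
--     # The values of keys are not useful at this stage of the program and so we use 0 as dummy values.
--     processed = {source:0}
--     reached = {}
--     for e in D[source]:
--         reached[e] = 0
--
--     # Repeat until reached set becomes empty or target is reached
--     while reached:
--         # Check if target is in reached; this would imply there is path from source to target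
--         if target in reached:
--             return True
--
--         # Pick an item in reached and process it
--         item = reached.popitem() # returns an arbitrary key-value pair as a tuple
--         newWord = item[0]
--
--         # Find all neighbors of this item and add new neighbors to reached
--         processed[newWord] = 0
--         for neighbor in D[newWord]:
--             if neighbor not in reached and neighbor not in processed:
--                 reached[neighbor] = 0
--
--     return False
-- ===== SOURCE B (Python) =====
-- def searchWordNetwork(source, target, D):
--     # Fixed-point computation instead of a worklist search: repeatedly sweep the
--     # whole dictionary, unioning D[u] into `reach` for every already-reached key u,
--     # until a full sweep adds nothing; then answer by membership.
--     reach = set(D[source])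
--     while True:
--         size = len(reach)
--         for u in D:
--             if u in reach:
--                 reach |= set(D[u])
--         if len(reach) == size:
--             return target in reach
-- ===== Notes on version B (the rewrite author's own statement) =====
-- stated objective: alternative
-- what changed: Replaces A's worklist search (reached/processed bookkeeping dicts, popitem loop, top-of-loop target test) by a fixed-point computation: repeatedly sweep the whole adjacency dict, unioning D[u] into one reach set for every already-reached key u, until a full sweep adds nothing, then answer by a single membership test.
-- outside the precondition, e.g. on searchWordNetwork('a', 'a', {'a': ['b'], 'b': ['a']}): A returns False, B returns True; on searchWordNetwork('a', 'c', {'a': ['b'], 'b': ['c', 'x']}): A returns True, B returns True; on searchWordNetwork('a', 'b', {'a': ['x']}): A raises KeyError, B returns False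
import Mathlib
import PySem

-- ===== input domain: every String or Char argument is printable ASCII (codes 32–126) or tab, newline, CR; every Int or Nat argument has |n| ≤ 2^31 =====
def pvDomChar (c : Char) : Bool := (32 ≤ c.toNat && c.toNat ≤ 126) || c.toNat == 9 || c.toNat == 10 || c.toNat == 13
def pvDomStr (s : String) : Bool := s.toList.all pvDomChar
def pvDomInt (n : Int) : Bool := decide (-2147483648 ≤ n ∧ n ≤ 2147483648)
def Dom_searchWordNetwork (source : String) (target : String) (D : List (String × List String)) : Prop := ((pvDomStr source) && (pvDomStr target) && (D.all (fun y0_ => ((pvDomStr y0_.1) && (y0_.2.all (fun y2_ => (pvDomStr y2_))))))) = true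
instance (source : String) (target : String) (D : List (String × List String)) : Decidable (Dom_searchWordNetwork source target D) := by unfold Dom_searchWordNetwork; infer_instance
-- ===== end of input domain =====

-- B replaces A's worklist search (reached/processed dicts, popitem loop) by a fixed-point
-- computation that repeatedly sweeps the whole adjacency dict until a sweep adds nothing
-- (objective: alternative algorithm, not claimed faster).

-- all neighbour occurrences in D; bounds the fuel of both loop ports
def pvAllNbrs (D : List (String × List String)) : List String := (D.map Prod.snd).flatten

-- ===== PORT A =====
-- reached[e] = 0 for e in D[source]
def pvSeedA (ns : List String) : PySem.Dict String Int :=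
  ns.foldl (fun d e => d.insert e 0) PySem.Dict.empty

-- for neighbor in D[newWord]: if neighbor not in reached and neighbor not in processed: reached[neighbor] = 0
def pvInnerA (processed : PySem.Dict String Int) (ns : List String)
    (reached : PySem.Dict String Int) : PySem.Dict String Int :=
  ns.foldl (fun r n => if !r.contains n && !processed.contains n then r.insert n 0 else r) reached

-- fuel bound for A's while loop: each iteration pops one reached item and every insertion
-- consumes a fresh neighbour occurrence, so 1 + 2*|all neighbours| iterations never run out
def pvFuelA (D : List (String × List String)) : Nat := 1 + 2 * (pvAllNbrs D).length

-- the while loop; fuel is only consumed by a pop (popitem returns and removes the LAST item: exact)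
def pvLoopA (D : List (String × List String)) (target : String) :
    Nat → PySem.Dict String Int → PySem.Dict String Int → Bool
  | fuel, processed, reached =>
    if reached.items.isEmpty then false            -- while reached:
    else if reached.contains target then true      -- if target in reached: return True
    else match fuel with
      | 0 => false                                 -- fuel exhaustion (never reached: see pvFuelA)
      | f+1 =>
        match reached.items.getLast? with
        | none => false                            -- unreachable: items nonempty
        | some item =>
          let newWord := item.1
          let reached1 : PySem.Dict String Int := PySem.Dict.mk reached.items.dropLast
          let processed1 := processed.insert newWord 0
          match (PySem.Dict.mk D).get? newWord with
          | none => false                          -- KeyError on D[newWord]: excluded by Pre_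
          | some ns => pvLoopA D target f processed1 (pvInnerA processed1 ns reached1)

def searchWordNetwork (source : String) (target : String) (D : List (String × List String)) : Bool :=
  match (PySem.Dict.mk D).get? source with
  | none => false                                  -- KeyError on D[source]: excluded by Pre_
  | some ns =>
    let processed := (PySem.Dict.empty : PySem.Dict String Int).insert source 0
    let reached := pvSeedA ns
    pvLoopA D target (pvFuelA D) processed reached

-- ===== PORT B =====
-- loop body: if u in reach: reach |= set(D[u])
def pvStep (D : List (String × List String)) (r : PySem.Set String) (u : String) : PySem.Set String :=
  if PySem.Set.contains r u then PySem.Set.union r ((PySem.Dict.mk D).getD u []) else r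

-- one full sweep: for u in D: if u in reach: reach |= set(D[u])
def pvSweep (D : List (String × List String)) (reach : PySem.Set String) : PySem.Set String :=
  (PySem.Dict.mk D).keys.foldl (pvStep D) reach

-- fuel bound for B's while loop: every continuing sweep grows reach by a fresh neighbour
def pvFuelB (D : List (String × List String)) : Nat := 1 + (pvAllNbrs D).length

-- while True: size = len(reach); sweep; if len(reach) == size: return target in reach
def pvLoopB (D : List (String × List String)) (target : String) :
    Nat → PySem.Set String → Bool
  | 0, _ => false                                  -- fuel exhaustion (never reached: see pvFuelB)
  | f+1, reach =>
    let r' := pvSweep D reach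
    if PySem.Set.len r' == PySem.Set.len reach then PySem.Set.contains r' target
    else pvLoopB D target f r'

def searchWordNetwork_alt (source : String) (target : String) (D : List (String × List String)) : Bool :=
  match (PySem.Dict.mk D).get? source with
  | none => false                                  -- KeyError on D[source]: excluded by Pre_
  | some ns => pvLoopB D target (pvFuelB D) (PySem.Set.ofList ns)

-- ===== PRECONDITION & SPEC =====
-- Pre_ excludes (i) inputs on which the traversal can hit a missing key (KeyError): unless the
-- run is trivial (target directly in D[source], or D[source] empty) we require every neighbour
-- anywhere to be a key or the target itself — slightly stronger than A needs, since an early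
-- target hit can stop A before a dangling neighbour is expanded — and (ii) in that same general
-- case, target == source, an unspecified corner ("does a word reach itself?") where A says yes
-- only for a direct self-loop while B says yes for any cycle.
def Pre_searchWordNetwork (source : String) (target : String) (D : List (String × List String)) : Prop :=
  source ∈ (PySem.Dict.mk D).keys ∧
    (target ∈ (PySem.Dict.mk D).getD source [] ∨
      (PySem.Dict.mk D).getD source [] = [] ∨
      (target ≠ source ∧ ∀ p ∈ D, ∀ n ∈ p.2, n ∈ (PySem.Dict.mk D).keys ∨ n = target))

instance (source : String) (target : String) (D : List (String × List String)) : Decidable (Pre_searchWordNetwork source target D) := by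
  unfold Pre_searchWordNetwork; infer_instance

def pvWitness_searchWordNetwork : String × String × (List (String × List String)) :=
  ("cat", "cot", [("cat", ["cot", "car"]), ("cot", []), ("car", ["cat"])])

def Spec_searchWordNetwork (source : String) (target : String) (D : List (String × List String)) (out : Bool) : Prop := out = searchWordNetwork_alt source target D
instance (source : String) (target : String) (D : List (String × List String)) (out : Bool) : Decidable (Spec_searchWordNetwork source target D out) := by unfold Spec_searchWordNetwork; infer_instance

-- ===== CLAIM (what is proved, stated in full; the proofs are below) =====
def Claim_equal_searchWordNetwork : Prop := ∀ (source : String) (target : String) (D : List (String × List String)), Dom_searchWordNetwork source target D → Pre_searchWordNetwork source target D → Spec_searchWordNetwork source target D (searchWordNetwork source target D)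

-- ===== LEMMAS AND PROOFS =====

-- x is reachable from the node set `seed` (expanding only keys of D); both proofs are
-- reductions of their loop to membership of `target` in such a closure.
inductive PvReach (D : List (String × List String)) : List String → String → Prop
  | base {seed : List String} {x : String} : x ∈ seed → PvReach D seed x
  | step {seed : List String} {u x : String} {ns : List String} :
      PvReach D seed u → (PySem.Dict.mk D).get? u = some ns → x ∈ ns → PvReach D seed x

theorem pvReach_bind {D : List (String × List String)} {S T : List String} {x : String}
    (h : ∀ a ∈ S, PvReach D T a) : PvReach D S x → PvReach D T x := by
  intro hr
  induction hr with
  | base hx => exact h _ hx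
  | step _ hget hn ih => exact PvReach.step ih hget hn

theorem pvReach_mono {D : List (String × List String)} {S T : List String} {x : String}
    (h : ∀ a ∈ S, a ∈ T) : PvReach D S x → PvReach D T x :=
  pvReach_bind (fun a ha => PvReach.base (h a ha))

theorem pvReach_closed {D : List (String × List String)} {S : List String} {x : String}
    (h : ∀ u ∈ S, ∀ ns, (PySem.Dict.mk D).get? u = some ns → ∀ n ∈ ns, n ∈ S) :
    PvReach D S x → x ∈ S := by
  intro hr
  induction hr with
  | base hx => exact hx
  | step _ hget hn ih => exact h _ ih _ hget _ hn

theorem pv_nbr_mem {D : List (String × List String)} {u n : String} {ns : List String}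
    (hget : (PySem.Dict.mk D).get? u = some ns) (hn : n ∈ ns) : n ∈ pvAllNbrs D := by
  have hmem : (u, ns) ∈ D := PySem.Dict.mem_items_of_get?_eq_some _ hget
  exact List.mem_flatten.mpr ⟨ns, List.mem_map.mpr ⟨(u, ns), hmem, rfl⟩, hn⟩

theorem pv_nbr_len {D : List (String × List String)} {u : String} {ns : List String}
    (hget : (PySem.Dict.mk D).get? u = some ns) : ns.length ≤ (pvAllNbrs D).length := by
  have hmem : (u, ns) ∈ D := PySem.Dict.mem_items_of_get?_eq_some _ hget
  have : ns ∈ D.map Prod.snd := List.mem_map.mpr ⟨(u, ns), hmem, rfl⟩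
  exact (List.sublist_flatten_of_mem this).length_le

-- ---- B side ----

theorem pvUnion_append (s : PySem.Set String) (l : List String) :
    ∃ e, PySem.Set.union s l = s ++ e :=
  ⟨(PySem.Set.ofList l).filter (fun y => !(PySem.Set.contains s y)),
    PySem.Set.update_eq_append_filter s l⟩

-- a fold whose every step only appends, itself only appends
theorem pvFoldl_append {α β : Type} (f : List α → β → List α)
    (h : ∀ s p, ∃ e, f s p = s ++ e) :
    ∀ (l : List β) (s : List α), ∃ e, l.foldl f s = s ++ e := by
  intro l
  induction l with
  | nil => exact fun s => ⟨[], by simp⟩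
  | cons a t ih =>
    intro s
    obtain ⟨e1, he1⟩ := h s a
    obtain ⟨e2, he2⟩ := ih (s ++ e1)
    exact ⟨e1 ++ e2, by simp [List.foldl_cons, he1, he2]⟩

theorem pvFoldl_fix {α β : Type} (f : List α → β → List α)
    (h : ∀ s p, ∃ e, f s p = s ++ e) :
    ∀ (l : List β) (s : List α), l.foldl f s = s → ∀ p ∈ l, f s p = s := by
  intro l
  induction l with
  | nil => intro s _ p hp; simp at hp
  | cons a t ih =>
    intro s hfix p hp
    obtain ⟨e1, he1⟩ := h s a
    obtain ⟨e2, he2⟩ := pvFoldl_append f h t (s ++ e1)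
    rw [List.foldl_cons, he1, he2] at hfix
    have hlen : e1 = [] := by
      have hl := congrArg List.length hfix
      simp only [List.length_append] at hl
      rw [List.eq_nil_iff_length_eq_zero]
      omega
    rcases List.mem_cons.mp hp with rfl | hp
    · rw [he1, hlen, List.append_nil]
    · refine ih s ?_ p hp
      rw [hlen] at he2 hfix
      simpa using he2.trans hfix

theorem pvSweep_step_append (D : List (String × List String)) :
    ∀ (s : PySem.Set String) (u : String), ∃ e, pvStep D s u = s ++ e := by
  intro s u
  unfold pvStep
  split
  · exact pvUnion_append s _
  · exact ⟨[], by simp⟩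

theorem pvSweep_append (D : List (String × List String)) (reach : PySem.Set String) :
    ∃ e, pvSweep D reach = reach ++ e :=
  pvFoldl_append _ (pvSweep_step_append D) _ reach

theorem pvSweep_sound (D : List (String × List String)) (reach : PySem.Set String) :
    ∀ x ∈ pvSweep D reach, PvReach D reach x := by
  have main : ∀ (l : List String) (s : PySem.Set String),
      (∀ x ∈ s, PvReach D reach x) →
      ∀ x ∈ l.foldl (pvStep D) s, PvReach D reach x := by
    intro l
    induction l with
    | nil => intro s hs; simpa using hs
    | cons a t ih =>
      intro s hs
      rw [List.foldl_cons]
      apply ih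
      intro x hx
      unfold pvStep at hx
      by_cases hc : PySem.Set.contains s a = true
      · rw [if_pos hc] at hx
        rcases (PySem.Set.mem_union _ _ _).mp hx with hx | hx
        · exact hs x hx
        · have hu : PvReach D reach a := hs a ((PySem.Set.contains_iff _ _).mp hc)
          rcases hget : (PySem.Dict.mk D).get? a with _ | ns
          · rw [PySem.Dict.getD_eq_get?_getD, hget] at hx; simp at hx
          · rw [PySem.Dict.getD_eq_get?_getD, hget] at hx
            exact PvReach.step hu hget hx
      · rw [if_neg hc] at hx
        exact hs x hx
  exact main _ reach (fun x hx => PvReach.base hx)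

theorem pvSweep_fix_closed (D : List (String × List String)) (reach : PySem.Set String)
    (hfix : pvSweep D reach = reach) :
    ∀ u ∈ reach, ∀ ns, (PySem.Dict.mk D).get? u = some ns → ∀ n ∈ ns, n ∈ reach := by
  intro u hu ns hget n hn
  have hukeys : u ∈ (PySem.Dict.mk D).keys := by
    by_contra hk
    rw [(PySem.Dict.get?_eq_none_iff_not_mem_keys _ _).mpr hk] at hget
    exact absurd hget (by simp)
  have hstep := pvFoldl_fix _ (pvSweep_step_append D) _ reach hfix u hukeys
  unfold pvStep at hstep
  rw [if_pos ((PySem.Set.contains_iff _ _).mpr hu)] at hstep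
  have : n ∈ PySem.Set.union reach ((PySem.Dict.mk D).getD u []) := by
    apply (PySem.Set.mem_union _ _ _).mpr
    right
    rw [PySem.Dict.getD_eq_get?_getD, hget]
    exact hn
  rw [hstep] at this
  exact this

theorem pvSweep_nodup (D : List (String × List String)) (reach : PySem.Set String)
    (h : reach.Nodup) : (pvSweep D reach).Nodup := by
  have main : ∀ (l : List String) (s : PySem.Set String), s.Nodup →
      (l.foldl (pvStep D) s).Nodup := by
    intro l
    induction l with
    | nil => intro s hs; simpa using hs
    | cons a t ih =>
      intro s hs
      rw [List.foldl_cons]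
      apply ih
      unfold pvStep
      split
      · exact PySem.Set.nodup_union _ _ hs
      · exact hs
  exact main _ reach h

theorem pvSweep_sub (D : List (String × List String)) (reach : PySem.Set String)
    (h : ∀ x ∈ reach, x ∈ pvAllNbrs D) : ∀ x ∈ pvSweep D reach, x ∈ pvAllNbrs D := by
  have main : ∀ (l : List String) (s : PySem.Set String), (∀ x ∈ s, x ∈ pvAllNbrs D) →
      ∀ x ∈ l.foldl (pvStep D) s, x ∈ pvAllNbrs D := by
    intro l
    induction l with
    | nil => intro s hs; simpa using hs
    | cons a t ih =>
      intro s hs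
      rw [List.foldl_cons]
      apply ih
      intro x hx
      unfold pvStep at hx
      by_cases hc : PySem.Set.contains s a = true
      · rw [if_pos hc] at hx
        rcases (PySem.Set.mem_union _ _ _).mp hx with hx | hx
        · exact hs x hx
        · rcases hget : (PySem.Dict.mk D).get? a with _ | ns
          · rw [PySem.Dict.getD_eq_get?_getD, hget] at hx; simp at hx
          · rw [PySem.Dict.getD_eq_get?_getD, hget] at hx
            exact pv_nbr_mem hget hx
      · rw [if_neg hc] at hx
        exact hs x hx
  exact main _ reach h

theorem pvLoopB_spec (D : List (String × List String)) (target : String) :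
    ∀ (fuel : Nat) (reach : PySem.Set String), reach.Nodup →
      (∀ x ∈ reach, x ∈ pvAllNbrs D) →
      (pvAllNbrs D).length + 1 ≤ fuel + reach.length →
      (pvLoopB D target fuel reach = true ↔ PvReach D reach target) := by
  intro fuel
  induction fuel with
  | zero =>
    intro reach hnd hsub hfuel
    exfalso
    have hsb : reach ⊆ pvAllNbrs D := by intro x hx; exact hsub x hx
    have := (hnd.subperm hsb).length_le
    omega
  | succ f ih =>
    intro reach hnd hsub hfuel
    have hunf : pvLoopB D target (f+1) reach =
        (if (PySem.Set.len (pvSweep D reach) == PySem.Set.len reach) = true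
          then PySem.Set.contains (pvSweep D reach) target
          else pvLoopB D target f (pvSweep D reach)) := rfl
    obtain ⟨e, he⟩ := pvSweep_append D reach
    rcases eq_or_ne e [] with rfl | hne
    · have hfix : pvSweep D reach = reach := by simpa using he
      have hlen : (PySem.Set.len (pvSweep D reach) == PySem.Set.len reach) = true := by
        rw [hfix]; simp
      rw [hunf, hlen, if_pos rfl, hfix]
      rw [PySem.Set.contains_iff]
      constructor
      · exact PvReach.base
      · exact pvReach_closed (pvSweep_fix_closed D reach hfix)
    · have hpos : 0 < e.length := List.length_pos_iff.mpr hne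
      have hlen : (PySem.Set.len (pvSweep D reach) == PySem.Set.len reach) = false := by
        rw [beq_eq_false_iff_ne]
        show ((pvSweep D reach).length : Int) ≠ ((reach.length : Int))
        rw [he, List.length_append]
        push_cast
        omega
      have hgrow : reach.length + 1 ≤ (pvSweep D reach).length := by
        rw [he, List.length_append]; omega
      rw [hunf, hlen]
      simp only [Bool.false_eq_true, if_false]
      refine (ih (pvSweep D reach) (pvSweep_nodup D reach hnd) (pvSweep_sub D reach hsub)
        (by omega)).trans ?_
      constructor
      · exact pvReach_bind (pvSweep_sound D reach)
      · exact pvReach_mono (fun a ha => by rw [he]; exact List.mem_append_left _ ha)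

-- ---- A side ----

-- neighbour occurrences not yet recorded anywhere; |reached| + |pvCands| strictly drops each iteration
def pvCands (D : List (String × List String)) (p r : PySem.Dict String Int) : List String :=
  (PySem.List.dedup (pvAllNbrs D)).filter (fun n => !p.contains n && !r.contains n)

def pvMu (D : List (String × List String)) (p r : PySem.Dict String Int) : Nat :=
  r.keys.length + (pvCands D p r).length

theorem pvInnerA_keys_mono (p : PySem.Dict String Int) (ns : List String)
    (r : PySem.Dict String Int) (x : String) (hx : x ∈ r.keys) :
    x ∈ (pvInnerA p ns r).keys := by
  induction ns generalizing r with
  | nil => simpa [pvInnerA] using hx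
  | cons n t ih =>
    simp only [pvInnerA, List.foldl_cons]
    split
    · exact ih _ ((PySem.Dict.mem_keys_insert _ _ _ _).mpr (Or.inr hx))
    · exact ih _ hx

theorem pvInnerA_keys_sub (p : PySem.Dict String Int) (ns : List String)
    (r : PySem.Dict String Int) (x : String) :
    x ∈ (pvInnerA p ns r).keys → x ∈ r.keys ∨ x ∈ ns := by
  induction ns generalizing r with
  | nil => intro h; exact Or.inl (by simpa [pvInnerA] using h)
  | cons n t ih =>
    intro h
    simp only [pvInnerA, List.foldl_cons] at h
    by_cases hc : (!r.contains n && !p.contains n) = true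
    · rw [if_pos hc] at h
      rcases ih _ h with hx | hx
      · rcases (PySem.Dict.mem_keys_insert _ _ _ _).mp hx with rfl | hx
        · exact Or.inr (List.mem_cons_self ..)
        · exact Or.inl hx
      · exact Or.inr (List.mem_cons_of_mem _ hx)
    · rw [if_neg hc] at h
      rcases ih _ h with hx | hx
      · exact Or.inl hx
      · exact Or.inr (List.mem_cons_of_mem _ hx)

theorem pvInnerA_covers (p : PySem.Dict String Int) (ns : List String)
    (r : PySem.Dict String Int) :
    ∀ n ∈ ns, n ∈ (pvInnerA p ns r).keys ∨ p.contains n = true := by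
  induction ns generalizing r with
  | nil => intro n hn; simp at hn
  | cons m t ih =>
    intro n hn
    have hfold : pvInnerA p (m :: t) r =
        pvInnerA p t (if !r.contains m && !p.contains m then r.insert m 0 else r) := by
      simp [pvInnerA]
    rcases List.mem_cons.mp hn with rfl | hn
    · by_cases hc : (!r.contains n && !p.contains n) = true
      · rw [hfold, if_pos hc]
        exact Or.inl (pvInnerA_keys_mono _ _ _ _ ((PySem.Dict.mem_keys_insert _ _ _ _).mpr (Or.inl rfl)))
      · have hor : r.contains n = true ∨ p.contains n = true := by
          cases hr : r.contains n with
          | true => exact Or.inl rfl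
          | false =>
            cases hp : p.contains n with
            | true => exact Or.inr rfl
            | false => exact absurd (by rw [hr, hp]; rfl) hc
        rcases hor with h | h
        · have hk : n ∈ r.keys := (PySem.Dict.contains_iff_mem_keys _ _).mp h
          rw [hfold]
          refine Or.inl (pvInnerA_keys_mono _ _ _ _ ?_)
          split
          · exact (PySem.Dict.mem_keys_insert _ _ _ _).mpr (Or.inr hk)
          · exact hk
        · exact Or.inr h
    · rw [hfold]
      exact ih _ n hn

-- removing one occurrence from a duplicate-free list by filtering
theorem pvFilter_ne_length {m : List String} (hm : m.Nodup) {n : String} (hn : n ∈ m) :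
    (m.filter (fun a => !(a == n))).length + 1 = m.length := by
  induction m with
  | nil => simp at hn
  | cons b t ih =>
    rcases List.mem_cons.mp hn with rfl | hn
    · have hnt : n ∉ t := (List.nodup_cons.mp hm).1
      have hft : t.filter (fun x => !(x == n)) = t := by
        apply List.filter_eq_self.mpr
        intro x hx
        have hxn : x ≠ n := fun h => hnt (h ▸ hx)
        simp [hxn]
      simp [hft]
    · have hb : (b == n) = false :=
        beq_eq_false_iff_ne.mpr (by rintro rfl; exact (List.nodup_cons.mp hm).1 hn)
      have ht := ih (List.nodup_cons.mp hm).2 hn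
      simp only [List.filter_cons, hb, Bool.not_false, if_true, List.length_cons]
      omega

theorem pvCands_insert (D : List (String × List String)) (p r : PySem.Dict String Int)
    {n : String} (hr : r.contains n = false) (hp : p.contains n = false)
    (hn : n ∈ pvAllNbrs D) :
    (pvCands D p (r.insert n 0)).length + 1 = (pvCands D p r).length := by
  have hc : pvCands D p (r.insert n 0) = (pvCands D p r).filter (fun a => !(a == n)) := by
    unfold pvCands
    rw [List.filter_filter]
    apply List.filter_congr
    intro a _
    rw [PySem.Dict.contains_insert]
    cases p.contains a <;> cases r.contains a <;> cases a == n <;> rfl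
  have hmem : n ∈ pvCands D p r := by
    unfold pvCands
    rw [List.mem_filter]
    exact ⟨(PySem.List.mem_dedup _ _).mpr hn, by rw [hr, hp]; rfl⟩
  have hnd : (pvCands D p r).Nodup := (PySem.List.nodup_dedup _).filter _
  rw [hc]
  exact pvFilter_ne_length hnd hmem

theorem pvInnerA_mu (D : List (String × List String)) (p : PySem.Dict String Int)
    (ns : List String) (r : PySem.Dict String Int)
    (hns : ∀ n ∈ ns, n ∈ pvAllNbrs D) :
    pvMu D p (pvInnerA p ns r) ≤ pvMu D p r := by
  induction ns generalizing r with
  | nil => simp [pvInnerA, pvMu]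
  | cons n t ih =>
    have hfold : pvInnerA p (n :: t) r =
        pvInnerA p t (if !r.contains n && !p.contains n then r.insert n 0 else r) := by
      simp [pvInnerA]
    rw [hfold]
    by_cases hc : (!r.contains n && !p.contains n) = true
    · rw [if_pos hc]
      have hr : r.contains n = false := by revert hc; cases r.contains n <;> simp
      have hp : p.contains n = false := by revert hc; cases p.contains n <;> simp
      have hkeys : (r.insert n 0).keys.length = r.keys.length + 1 := by
        rw [PySem.Dict.keys_insert_of_not_contains r 0 hr]; simp
      have hcand := pvCands_insert D p r hr hp (hns n (List.mem_cons_self ..))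
      have hmu : pvMu D p (r.insert n 0) = pvMu D p r := by
        unfold pvMu; omega
      calc pvMu D p (pvInnerA p t (r.insert n 0)) ≤ pvMu D p (r.insert n 0) :=
            ih _ (fun m hm => hns m (List.mem_cons_of_mem _ hm))
        _ = pvMu D p r := hmu
    · rw [if_neg hc]
      exact ih _ (fun m hm => hns m (List.mem_cons_of_mem _ hm))

-- loop exit with reached empty: nothing reachable is missing from processed
theorem pvLoopA_terminal_empty (D : List (String × List String)) (target : String)
    (fuel : Nat) (p r : PySem.Dict String Int)
    (SC : ∀ u, p.contains u = true → ∀ ns, (PySem.Dict.mk D).get? u = some ns →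
        ∀ n ∈ ns, r.contains n = true ∨ p.contains n = true)
    (TN : p.contains target = false)
    (hemp : r.items.isEmpty = true) :
    (pvLoopA D target fuel p r = true ↔ PvReach D (r.keys ++ p.keys) target) := by
  have hre : r.items = [] := by simpa using hemp
  have hkeys : r.keys = [] := by simp [PySem.Dict.keys, hre]
  rw [show pvLoopA D target fuel p r = false from by rw [pvLoopA.eq_def]; simp [hemp]]
  simp only [Bool.false_eq_true, false_iff]
  intro hreach
  rw [hkeys, List.nil_append] at hreach
  have hmem : target ∈ p.keys := by
    refine pvReach_closed ?_ hreach
    intro u hu ns hget n hn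
    rcases SC u ((PySem.Dict.contains_iff_mem_keys _ _).mpr hu) ns hget n hn with h | h
    · rw [PySem.Dict.contains_eq_decide_mem_keys, hkeys] at h
      simp at h
    · exact (PySem.Dict.contains_iff_mem_keys _ _).mp h
  have : p.contains target = true := (PySem.Dict.contains_iff_mem_keys _ _).mpr hmem
  rw [TN] at this
  exact Bool.noConfusion this

-- loop exit with the target sitting in reached
theorem pvLoopA_terminal_found (D : List (String × List String)) (target : String)
    (fuel : Nat) (p r : PySem.Dict String Int)
    (hemp : ¬ r.items.isEmpty = true) (hct : r.contains target = true) :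
    (pvLoopA D target fuel p r = true ↔ PvReach D (r.keys ++ p.keys) target) := by
  have hemp' : r.items.isEmpty = false := by revert hemp; cases r.items.isEmpty <;> simp
  rw [show pvLoopA D target fuel p r = true from by rw [pvLoopA.eq_def]; simp [hemp', hct]]
  simp only [true_iff]
  exact PvReach.base (List.mem_append_left _ ((PySem.Dict.contains_iff_mem_keys _ _).mp hct))

theorem pvLoopA_spec (D : List (String × List String)) (target : String)
    (HG : ∀ q ∈ D, ∀ n ∈ q.2, n ∈ (PySem.Dict.mk D).keys ∨ n = target) :
    ∀ (fuel : Nat) (p r : PySem.Dict String Int),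
      (∀ u, p.contains u = true → ∀ ns, (PySem.Dict.mk D).get? u = some ns →
          ∀ n ∈ ns, r.contains n = true ∨ p.contains n = true) →
      p.contains target = false →
      (∀ u ∈ r.keys, u ∈ (PySem.Dict.mk D).keys ∨ u = target) →
      (∀ u, p.contains u = true → u ∈ (PySem.Dict.mk D).keys) →
      pvMu D p r ≤ fuel →
      (pvLoopA D target fuel p r = true ↔ PvReach D (r.keys ++ p.keys) target) := by
  intro fuel
  induction fuel with
  | zero =>
    intro p r SC TN RK PK F
    by_cases hemp : r.items.isEmpty = true
    · exact pvLoopA_terminal_empty D target 0 p r SC TN hemp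
    · by_cases hct : r.contains target = true
      · exact pvLoopA_terminal_found D target 0 p r hemp hct
      · exfalso
        have hine : r.items ≠ [] := fun h => hemp (by simp [h])
        have hpos : 0 < r.keys.length := by
          simpa [PySem.Dict.keys] using List.length_pos_iff.mpr hine
        unfold pvMu at F
        omega
  | succ f ih =>
    intro p r SC TN RK PK F
    by_cases hemp : r.items.isEmpty = true
    · exact pvLoopA_terminal_empty D target (f+1) p r SC TN hemp
    · by_cases hct : r.contains target = true
      · exact pvLoopA_terminal_found D target (f+1) p r hemp hct
      · have hct' : r.contains target = false := by revert hct; cases r.contains target <;> simp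
        have hemp' : r.items.isEmpty = false := by revert hemp; cases r.items.isEmpty <;> simp
        have hine : r.items ≠ [] := by simp [← List.isEmpty_eq_false_iff, hemp']
        obtain ⟨init, item, hsplit⟩ : ∃ init item, r.items = init ++ [item] := by
          rcases List.eq_nil_or_concat r.items with h | ⟨init, item, h⟩
          · exact absurd h hine
          · exact ⟨init, item, by simpa using h⟩
        have hlast : r.items.getLast? = some item := by rw [hsplit]; simp
        have hukeys : item.1 ∈ r.keys := by
          rw [PySem.Dict.keys, hsplit]; simp
        have hunt : item.1 ≠ target := by
          rintro heq
          rw [PySem.Dict.contains_eq_decide_mem_keys] at hct'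
          rw [heq] at hukeys
          simp [hukeys] at hct'
        have huD : item.1 ∈ (PySem.Dict.mk D).keys := by
          rcases RK item.1 hukeys with h | h
          · exact h
          · exact absurd h hunt
        obtain ⟨ns, hget⟩ : ∃ ns, (PySem.Dict.mk D).get? item.1 = some ns := by
          rcases h : (PySem.Dict.mk D).get? item.1 with _ | ns
          · exact absurd huD ((PySem.Dict.get?_eq_none_iff_not_mem_keys _ _).mp h)
          · exact ⟨ns, rfl⟩
        have hns_all : ∀ n ∈ ns, n ∈ pvAllNbrs D := fun n hn => pv_nbr_mem hget hn
        have hnsHG : ∀ n ∈ ns, n ∈ (PySem.Dict.mk D).keys ∨ n = target := by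
          intro n hn
          exact HG (item.1, ns) (PySem.Dict.mem_items_of_get?_eq_some _ hget) n hn
        have hr1keys : (PySem.Dict.mk r.items.dropLast).keys = r.keys.dropLast := by
          simp [PySem.Dict.keys, List.map_dropLast]
        have hkeyssplit : r.keys = (PySem.Dict.mk r.items.dropLast).keys ++ [item.1] := by
          rw [hr1keys]
          unfold PySem.Dict.keys
          rw [hsplit]
          simp
        have hstep : pvLoopA D target (f+1) p r =
            pvLoopA D target f (p.insert item.1 0)
              (pvInnerA (p.insert item.1 0) ns (PySem.Dict.mk r.items.dropLast)) := by
          conv_lhs => rw [pvLoopA.eq_def]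
          simp only [hemp', Bool.false_eq_true, if_false, hct', hlast, hget]
        set p1 := p.insert item.1 0 with hp1
        set r1 : PySem.Dict String Int := PySem.Dict.mk r.items.dropLast with hr1
        -- preservation of the four invariants
        have SC1 : ∀ v, p1.contains v = true → ∀ ms, (PySem.Dict.mk D).get? v = some ms →
            ∀ n ∈ ms, (pvInnerA p1 ns r1).contains n = true ∨ p1.contains n = true := by
          intro v hv ms hgv n hn
          rw [hp1, PySem.Dict.contains_insert] at hv
          have hinr : ∀ x, x ∈ (pvInnerA p1 ns r1).keys → (pvInnerA p1 ns r1).contains x = true :=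
            fun x hx => (PySem.Dict.contains_iff_mem_keys _ _).mpr hx
          rcases Bool.or_eq_true_iff.mp hv with hvu | hvp
          · -- v is the popped word: its neighbours were just explored
            have hvu' : v = item.1 := by simpa using hvu
            rw [hvu', hget] at hgv
            have hms := Option.some.inj hgv
            subst hms
            rcases pvInnerA_covers p1 ns r1 n hn with h | h
            · exact Or.inl (hinr n h)
            · exact Or.inr h
          · rcases SC v hvp ms hgv n hn with h | h
            · -- n was in reached: either still there, or it is the popped word, now processed
              have hnk : n ∈ r.keys := (PySem.Dict.contains_iff_mem_keys _ _).mp h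
              rw [hkeyssplit] at hnk
              rcases List.mem_append.mp hnk with hnk | hnk
              · exact Or.inl (hinr n (pvInnerA_keys_mono _ _ _ _ hnk))
              · have : n = item.1 := by simpa using hnk
                refine Or.inr ?_
                rw [hp1, PySem.Dict.contains_insert, this]
                simp
            · refine Or.inr ?_
              rw [hp1, PySem.Dict.contains_insert, h]
              simp
        have TN1 : p1.contains target = false := by
          rw [hp1, PySem.Dict.contains_insert, TN]
          simp [Ne.symm hunt]
        have RK1 : ∀ v ∈ (pvInnerA p1 ns r1).keys, v ∈ (PySem.Dict.mk D).keys ∨ v = target := by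
          intro v hvk
          rcases pvInnerA_keys_sub p1 ns r1 v hvk with h | h
          · exact RK v (by rw [hkeyssplit]; exact List.mem_append_left _ h)
          · exact hnsHG v h
        have PK1 : ∀ v, p1.contains v = true → v ∈ (PySem.Dict.mk D).keys := by
          intro v hv
          rw [hp1, PySem.Dict.contains_insert] at hv
          rcases Bool.or_eq_true_iff.mp hv with hvu | hvp
          · have : v = item.1 := by simpa using hvu
            rw [this]; exact huD
          · exact PK v hvp
        have F1 : pvMu D p1 (pvInnerA p1 ns r1) ≤ f := by
          have h1 : pvMu D p1 (pvInnerA p1 ns r1) ≤ pvMu D p1 r1 := pvInnerA_mu D p1 ns r1 hns_all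
          have hklen : r1.keys.length + 1 = r.keys.length := by
            rw [hkeyssplit]; simp
          have hcsub : (pvCands D p1 r1).length ≤ (pvCands D p r).length := by
            apply List.Sublist.length_le
            apply List.monotone_filter_right
            intro a ha
            have hap1 : p1.contains a = false ∧ r1.contains a = false := by
              revert ha
              cases p1.contains a <;> cases r1.contains a <;> simp
            have hau : (a == item.1) = false ∧ p.contains a = false := by
              have := hap1.1
              rw [hp1, PySem.Dict.contains_insert] at this
              revert this
              cases a == item.1 <;> cases p.contains a <;> simp
            have har : r.contains a = false := by
              rw [PySem.Dict.contains_eq_decide_mem_keys]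
              simp only [decide_eq_false_iff_not]
              intro hak
              rw [hkeyssplit] at hak
              rcases List.mem_append.mp hak with hak | hak
              · have := hap1.2
                rw [PySem.Dict.contains_eq_decide_mem_keys] at this
                simp [hak] at this
              · have : a = item.1 := by simpa using hak
                rw [this] at hau
                simp at hau
            rw [hau.2, har]
            rfl
          have h2 : pvMu D p1 r1 + 1 ≤ pvMu D p r := by
            unfold pvMu
            omega
          unfold pvMu at F ⊢
          unfold pvMu at h1 h2
          omega
        rw [hstep]
        refine (ih p1 (pvInnerA p1 ns r1) SC1 TN1 RK1 PK1 F1).trans ?_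
        constructor
        · -- everything now recorded was already reachable
          refine pvReach_bind ?_
          intro a ha
          rcases List.mem_append.mp ha with ha | ha
          · rcases pvInnerA_keys_sub p1 ns r1 a ha with h | h
            · exact PvReach.base (List.mem_append_left _ (by rw [hkeyssplit]; exact List.mem_append_left _ h))
            · exact PvReach.step (PvReach.base (List.mem_append_left _ hukeys)) hget h
          · rcases (PySem.Dict.mem_keys_insert _ _ _ _).mp ha with rfl | ha
            · exact PvReach.base (List.mem_append_left _ hukeys)
            · exact PvReach.base (List.mem_append_right _ ha)
        · -- the old base is still recorded
          refine pvReach_mono ?_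
          intro a ha
          rcases List.mem_append.mp ha with ha | ha
          · rw [hkeyssplit] at ha
            rcases List.mem_append.mp ha with ha | ha
            · exact List.mem_append_left _ (pvInnerA_keys_mono _ _ _ _ ha)
            · have : a = item.1 := by simpa using ha
              exact List.mem_append_right _ ((PySem.Dict.mem_keys_insert _ _ _ _).mpr (Or.inl this))
          · exact List.mem_append_right _ ((PySem.Dict.mem_keys_insert _ _ _ _).mpr (Or.inr ha))

theorem pvSeedA_keys (ns : List String) : (pvSeedA ns).keys = PySem.List.dedup ns := by
  unfold pvSeedA
  rw [show (fun (d : PySem.Dict String Int) e => d.insert e 0) = (fun d x => d.insert x ((fun _ _ => (0 : Int)) d x)) from rfl,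
    PySem.Dict.keys_foldl_insert]
  rw [PySem.List.dedup_eq_ofList]
  simp [PySem.Set.update_nil_left]

-- dropping `source` from the closure base is harmless: its neighbours are the base already
theorem pvBridge {D : List (String × List String)} {source x : String} {ns : List String}
    (hget : (PySem.Dict.mk D).get? source = some ns) :
    PvReach D (PySem.List.dedup ns ++ [source]) x → PvReach D (PySem.List.dedup ns) x ∨ x = source := by
  intro h
  induction h with
  | base hx =>
    rcases List.mem_append.mp hx with hx | hx
    · exact Or.inl (PvReach.base hx)
    · exact Or.inr (by simpa using hx)
  | step hu hg hn ih =>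
    rcases ih with hru | rfl
    · exact Or.inl (PvReach.step hru hg hn)
    · rw [hget] at hg
      obtain rfl : _ = ns := (Option.some.inj hg).symm
      exact Or.inl (PvReach.base ((PySem.List.mem_dedup _ _).mpr hn))

theorem pvBoolExt {a b : Bool} (h : (a = true) ↔ (b = true)) : a = b := by
  cases a <;> cases b <;> simp_all

theorem pvReach_nil (D : List (String × List String)) (x : String) :
    ¬ PvReach D [] x := by
  intro h
  induction h with
  | base hx => simp at hx
  | step _ _ _ ih => exact ih

-- ===== VERDICT (by name: the statement is the Claim_ definition above) =====
theorem searchWordNetwork_spec : Claim_equal_searchWordNetwork := by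
  intro source target D _ hpre
  obtain ⟨hsrc, hbr⟩ := hpre
  unfold Spec_searchWordNetwork searchWordNetwork searchWordNetwork_alt
  obtain ⟨ns, hget⟩ : ∃ ns, (PySem.Dict.mk D).get? source = some ns := by
    rcases h : (PySem.Dict.mk D).get? source with _ | ns
    · exact absurd hsrc ((PySem.Dict.get?_eq_none_iff_not_mem_keys _ _).mp h)
    · exact ⟨ns, rfl⟩
  rw [hget]
  show pvLoopA D target (pvFuelA D) ((PySem.Dict.empty : PySem.Dict String Int).insert source 0)
        (pvSeedA ns) =
      pvLoopB D target (pvFuelB D) (PySem.Set.ofList ns)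
  -- characterize B's loop
  have hnsub : ∀ x ∈ PySem.Set.ofList ns, x ∈ pvAllNbrs D := by
    intro x hx
    exact pv_nbr_mem hget ((PySem.Set.mem_ofList _ _).mp hx)
  have hBfuel : (pvAllNbrs D).length + 1 ≤ pvFuelB D + (PySem.Set.ofList ns).length := by
    unfold pvFuelB; omega
  have hB := pvLoopB_spec D target (pvFuelB D) (PySem.Set.ofList ns)
    (PySem.Set.nodup_ofList ns) hnsub hBfuel
  by_cases htns : target ∈ ns
  · -- target is a direct neighbour of source: both sides answer True
    have htk : target ∈ (pvSeedA ns).keys := by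
      rw [pvSeedA_keys]; exact (PySem.List.mem_dedup _ _).mpr htns
    have hct : (pvSeedA ns).contains target = true :=
      (PySem.Dict.contains_iff_mem_keys _ _).mpr htk
    have hne : (pvSeedA ns).items.isEmpty = false := by
      have hk : (pvSeedA ns).keys ≠ [] := fun h => by rw [h] at htk; simp at htk
      have : (pvSeedA ns).items ≠ [] := fun h => hk (by simp [PySem.Dict.keys, h])
      simpa [List.isEmpty_eq_false_iff] using this
    have hA : pvLoopA D target (pvFuelA D)
        ((PySem.Dict.empty : PySem.Dict String Int).insert source 0) (pvSeedA ns) = true := by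
      rw [pvLoopA.eq_def]; simp [hne, hct]
    rw [hA, hB.mpr (PvReach.base ((PySem.Set.mem_ofList _ _).mpr htns))]
  · by_cases hnil : ns = []
    · -- D[source] is empty: both loops stop at once with False
      subst hnil
      have hA : pvLoopA D target (pvFuelA D)
          ((PySem.Dict.empty : PySem.Dict String Int).insert source 0) (pvSeedA []) = false := by
        rw [pvLoopA.eq_def]
        rfl
      have hBf : pvLoopB D target (pvFuelB D) (PySem.Set.ofList []) = false := by
        cases hb : pvLoopB D target (pvFuelB D) (PySem.Set.ofList []) with
        | false => rfl
        | true => exact absurd (hB.mp hb) (pvReach_nil D target)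
      rw [hA, hBf]
    · -- otherwise Pre_ guarantees target ≠ source and every neighbour a key or the target
      obtain ⟨hts, hHG⟩ : target ≠ source ∧
          (∀ q ∈ D, ∀ n ∈ q.2, n ∈ (PySem.Dict.mk D).keys ∨ n = target) := by
        rcases hbr with h | h | h
        · rw [PySem.Dict.getD_eq_get?_getD, hget] at h
          exact absurd h htns
        · rw [PySem.Dict.getD_eq_get?_getD, hget] at h
          exact absurd h hnil
        · exact h
      have hsmem : (source, ns) ∈ D := PySem.Dict.mem_items_of_get?_eq_some _ hget
      have SC0 : ∀ u, ((PySem.Dict.empty : PySem.Dict String Int).insert source 0).contains u = true →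
          ∀ ms, (PySem.Dict.mk D).get? u = some ms →
          ∀ n ∈ ms, (pvSeedA ns).contains n = true ∨
            ((PySem.Dict.empty : PySem.Dict String Int).insert source 0).contains n = true := by
        intro u hu ms hgu n hn
        have hus : u = source := by
          rw [PySem.Dict.contains_insert, PySem.Dict.contains_empty] at hu
          simpa using hu
        subst hus
        rw [hget] at hgu
        have hms := Option.some.inj hgu
        subst hms
        left
        rw [PySem.Dict.contains_iff_mem_keys, pvSeedA_keys]
        exact (PySem.List.mem_dedup _ _).mpr hn
      have TN0 : ((PySem.Dict.empty : PySem.Dict String Int).insert source 0).contains target = false := by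
        rw [PySem.Dict.contains_insert, PySem.Dict.contains_empty]
        simp [hts]
      have RK0 : ∀ u ∈ (pvSeedA ns).keys, u ∈ (PySem.Dict.mk D).keys ∨ u = target := by
        intro u hu
        rw [pvSeedA_keys] at hu
        exact hHG (source, ns) hsmem u ((PySem.List.mem_dedup _ _).mp hu)
      have PK0 : ∀ u, ((PySem.Dict.empty : PySem.Dict String Int).insert source 0).contains u = true →
          u ∈ (PySem.Dict.mk D).keys := by
        intro u hu
        have hus : u = source := by
          rw [PySem.Dict.contains_insert, PySem.Dict.contains_empty] at hu
          simpa using hu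
        rw [hus]
        exact hsrc
      have F0 : pvMu D ((PySem.Dict.empty : PySem.Dict String Int).insert source 0) (pvSeedA ns) ≤ pvFuelA D := by
        have h1 : (pvSeedA ns).keys.length ≤ ns.length := by
          rw [pvSeedA_keys, PySem.List.dedup_eq_ofList]
          exact PySem.Set.length_ofList_le ns
        have h2 : ns.length ≤ (pvAllNbrs D).length := pv_nbr_len hget
        have h3 : (pvCands D ((PySem.Dict.empty : PySem.Dict String Int).insert source 0) (pvSeedA ns)).length ≤
            (pvAllNbrs D).length := by
          refine le_trans (List.length_filter_le _ _) ?_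
          rw [PySem.List.dedup_eq_ofList]
          exact PySem.Set.length_ofList_le _
        unfold pvMu pvFuelA
        omega
      have hA := pvLoopA_spec D target hHG (pvFuelA D)
        ((PySem.Dict.empty : PySem.Dict String Int).insert source 0) (pvSeedA ns) SC0 TN0 RK0 PK0 F0
      have hkeys0 : ((PySem.Dict.empty : PySem.Dict String Int).insert source 0).keys = [source] := by
        rw [PySem.Dict.keys_insert_of_not_contains PySem.Dict.empty 0 (PySem.Dict.contains_empty _)]
        simp
      have hset : PvReach D ((pvSeedA ns).keys ++
            ((PySem.Dict.empty : PySem.Dict String Int).insert source 0).keys) target ↔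
          PvReach D (PySem.Set.ofList ns) target := by
        rw [pvSeedA_keys, hkeys0]
        constructor
        · intro h
          rcases pvBridge hget h with h | rfl
          · rw [PySem.List.dedup_eq_ofList] at h
            exact h
          · exact absurd rfl hts
        · intro h
          refine pvReach_mono ?_ h
          intro a ha
          rw [PySem.List.dedup_eq_ofList]
          exact List.mem_append_left _ ha
      exact pvBoolExt (hA.trans (hset.trans hB.symm))
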